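-- pv_equiv track=rewrite | github.com/Armonis5/ThymioMob | camera.py | compute_dimensions
-- ===== SOURCE A (Python) =====
-- def compute_dimensions(blue_coordinates,old_height=0,old_origin=(0,0)):
--     """
--     Compute the dimensions of the map based on the blue squares
--     """
--     if len(blue_coordinates) != 4:
--         return 0,old_height,old_origin
--     min_x = min(blue_coord[0][0] for blue_coord in blue_coordinates)
--     max_x = max(blue_coord[0][0] for blue_coord in blue_coordinates)
--     min_y = min(blue_coord[0][1] for blue_coord in blue_coordinates)
--     max_y = max(blue_coord[0][1] for blue_coord in blue_coordinates)
--     width = max_x - min_x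
--     height = max_y - min_y
--     origin = (max_x, max_y)
--     return width, height, origin
-- ===== SOURCE B (Python) =====
-- def compute_dimensions(blue_coordinates, old_height=0, old_origin=(0, 0)):
--     """Sort the x- and y-coordinates; the extremes are the ends of the sorted lists."""
--     if len(blue_coordinates) != 4:
--         return 0, old_height, old_origin
--     xs = sorted(bc[0][0] for bc in blue_coordinates)
--     ys = sorted(bc[0][1] for bc in blue_coordinates)
--     return xs[-1] - xs[0], ys[-1] - ys[0], (xs[-1], ys[-1])
-- ===== Notes on version B (the rewrite author's own statement) =====
-- stated objective: alternative
-- what changed: B sorts the x-coordinates and the y-coordinates and reads the extremes off the ends of the sorted lists, instead of A's four separate min/max scans.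
import Mathlib
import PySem

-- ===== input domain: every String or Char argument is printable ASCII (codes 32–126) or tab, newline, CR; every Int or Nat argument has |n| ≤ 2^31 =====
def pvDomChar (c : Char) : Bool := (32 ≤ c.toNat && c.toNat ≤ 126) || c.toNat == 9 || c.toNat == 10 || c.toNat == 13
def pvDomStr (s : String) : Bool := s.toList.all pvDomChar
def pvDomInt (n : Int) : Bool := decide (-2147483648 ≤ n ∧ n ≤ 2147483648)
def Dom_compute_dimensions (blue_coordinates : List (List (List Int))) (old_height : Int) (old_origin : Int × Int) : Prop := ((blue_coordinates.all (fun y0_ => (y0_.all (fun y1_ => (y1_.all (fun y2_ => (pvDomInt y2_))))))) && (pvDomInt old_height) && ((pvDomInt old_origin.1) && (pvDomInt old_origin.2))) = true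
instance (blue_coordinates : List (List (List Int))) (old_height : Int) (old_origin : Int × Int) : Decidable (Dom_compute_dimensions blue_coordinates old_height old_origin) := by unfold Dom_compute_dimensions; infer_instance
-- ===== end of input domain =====

-- B sorts the x-coordinates and the y-coordinates and reads the extremes off the ends
-- of the sorted lists, instead of A's four separate min/max scans (objective: alternative).

-- shared accessor: bc[0][i]; the .getD 0 default is only reached outside Pre_ (where Python raises IndexError)
def pv_pt (bc : List (List Int)) (i : Int) : Int :=
  ((PySem.List.pyGet? bc 0).bind (fun p => PySem.List.pyGet? p i)).getD 0

-- ===== PORT A =====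
def compute_dimensions (blue_coordinates : List (List (List Int))) (old_height : Int) (old_origin : Int × Int) : Int × Int × (Int × Int) :=
  if blue_coordinates.length ≠ 4 then (0, old_height, old_origin)
  else
    let min_x := (PySem.List.min? (blue_coordinates.map (fun bc => pv_pt bc 0)) (fun v => v)).getD 0
    let max_x := (PySem.List.max? (blue_coordinates.map (fun bc => pv_pt bc 0)) (fun v => v)).getD 0
    let min_y := (PySem.List.min? (blue_coordinates.map (fun bc => pv_pt bc 1)) (fun v => v)).getD 0
    let max_y := (PySem.List.max? (blue_coordinates.map (fun bc => pv_pt bc 1)) (fun v => v)).getD 0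
    (max_x - min_x, max_y - min_y, (max_x, max_y))

-- ===== PORT B =====
def compute_dimensions_alt (blue_coordinates : List (List (List Int))) (old_height : Int) (old_origin : Int × Int) : Int × Int × (Int × Int) :=
  if blue_coordinates.length ≠ 4 then (0, old_height, old_origin)
  else
    let xs := PySem.List.sorted (blue_coordinates.map (fun bc => pv_pt bc 0)) (fun v => v)
    let ys := PySem.List.sorted (blue_coordinates.map (fun bc => pv_pt bc 1)) (fun v => v)
    let x_lo := (PySem.List.pyGet? xs 0).getD 0
    let x_hi := (PySem.List.pyGet? xs (-1)).getD 0
    let y_lo := (PySem.List.pyGet? ys 0).getD 0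
    let y_hi := (PySem.List.pyGet? ys (-1)).getD 0
    (x_hi - x_lo, y_hi - y_lo, (x_hi, y_hi))

-- ===== PRECONDITION & SPEC =====
-- Pre_ excludes only inputs where Python A raises IndexError: 4 squares with some point list empty or its first point shorter than 2.
def Pre_compute_dimensions (blue_coordinates : List (List (List Int))) (old_height : Int) (old_origin : Int × Int) : Prop :=
  blue_coordinates.length = 4 → ∀ bc ∈ blue_coordinates, 0 < bc.length ∧ 2 ≤ (bc.headD []).length
instance (blue_coordinates : List (List (List Int))) (old_height : Int) (old_origin : Int × Int) : Decidable (Pre_compute_dimensions blue_coordinates old_height old_origin) := by unfold Pre_compute_dimensions; infer_instance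

def pvWitness_compute_dimensions : List (List (List Int)) × Int × (Int × Int) :=
  ([[[1, 2]], [[3, 4]], [[0, 9]], [[5, 1]]], 0, (0, 0))

def Spec_compute_dimensions (blue_coordinates : List (List (List Int))) (old_height : Int) (old_origin : Int × Int) (out : Int × Int × (Int × Int)) : Prop := out = compute_dimensions_alt blue_coordinates old_height old_origin
instance (blue_coordinates : List (List (List Int))) (old_height : Int) (old_origin : Int × Int) (out : Int × Int × (Int × Int)) : Decidable (Spec_compute_dimensions blue_coordinates old_height old_origin out) := by unfold Spec_compute_dimensions; infer_instance

-- ===== CLAIM (what is proved, stated in full; the proofs are below) =====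
def Claim_equal_compute_dimensions : Prop := ∀ (blue_coordinates : List (List (List Int))) (old_height : Int) (old_origin : Int × Int), Dom_compute_dimensions blue_coordinates old_height old_origin → Pre_compute_dimensions blue_coordinates old_height old_origin → Spec_compute_dimensions blue_coordinates old_height old_origin (compute_dimensions blue_coordinates old_height old_origin)

-- ===== LEMMAS AND PROOFS =====

-- head of sorted(l) equals min(l) (as .getD 0 values), for nonempty l
lemma pv_sorted_head_eq_min (l : List Int) (h : l ≠ []) :
    (PySem.List.pyGet? (PySem.List.sorted l (fun v => v)) 0).getD 0
      = (PySem.List.min? l (fun v => v)).getD 0 := by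
  obtain ⟨m, t, hs⟩ : ∃ m t, PySem.List.sorted l (fun v => v) = m :: t := by
    cases hsl : PySem.List.sorted l (fun v => v) with
    | nil => exact absurd ((PySem.List.sorted_eq_nil_iff _ _ _).mp hsl) h
    | cons m t => exact ⟨m, t, rfl⟩
  obtain ⟨mn, hmn⟩ : ∃ mn, PySem.List.min? l (fun v => v) = some mn := by
    cases hm : PySem.List.min? l (fun v => v) with
    | none => exact absurd ((PySem.List.min?_eq_none_iff _ _).mp hm) h
    | some mn => exact ⟨mn, rfl⟩
  rw [hs, hmn]
  simp only [PySem.List.pyGet?, PySem.List.pyIdx?]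
  have hm_mem : m ∈ l := (PySem.List.mem_sorted _ _ _ _).mp (hs ▸ List.mem_cons_self)
  have hmn_mem : mn ∈ l := PySem.List.min?_mem hmn
  have h1 : m ≤ mn := PySem.List.key_head_sorted_le l (fun v => v) hs mn hmn_mem
  have h2 : mn ≤ m := PySem.List.min?_isMin hmn m hm_mem
  simp
  omega

-- last of sorted(l) equals max(l) (as .getD 0 values), for nonempty l
lemma pv_sorted_last_eq_max (l : List Int) (h : l ≠ []) :
    (PySem.List.pyGet? (PySem.List.sorted l (fun v => v)) (-1)).getD 0
      = (PySem.List.max? l (fun v => v)).getD 0 := by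
  have hsne : PySem.List.sorted l (fun v => v) ≠ [] := by
    simpa [PySem.List.sorted_eq_nil_iff] using h
  obtain ⟨mx, hmx⟩ : ∃ mx, PySem.List.max? l (fun v => v) = some mx := by
    cases hm : PySem.List.max? l (fun v => v) with
    | none => exact absurd ((PySem.List.max?_eq_none_iff _ _).mp hm) h
    | some mx => exact ⟨mx, rfl⟩
  rw [PySem.List.pyGet?_neg_one, hmx, List.getLast?_eq_some_getLast hsne]
  have hpw : (PySem.List.sorted l (fun v => v)).Pairwise (fun a b : Int => a ≤ b) :=
    PySem.List.sorted_pairwise l (fun v => v)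
  have hlast_mem : (PySem.List.sorted l (fun v => v)).getLast hsne ∈ l :=
    (PySem.List.mem_sorted _ _ _ _).mp (List.getLast_mem hsne)
  have hmx_mem : mx ∈ PySem.List.sorted l (fun v => v) :=
    (PySem.List.mem_sorted _ _ _ _).mpr (PySem.List.max?_mem hmx)
  have h1 : mx ≤ (PySem.List.sorted l (fun v => v)).getLast hsne :=
    hpw.rel_getLast hmx_mem
  have h2 : (PySem.List.sorted l (fun v => v)).getLast hsne ≤ mx :=
    PySem.List.max?_isMax hmx _ hlast_mem
  simp
  omega

-- ===== VERDICT (by name: the statement is the Claim_ definition above) =====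
theorem compute_dimensions_spec : Claim_equal_compute_dimensions := by
  intro bcs h o _ _
  unfold Spec_compute_dimensions
  by_cases hl : bcs.length = 4
  · have hne : bcs ≠ [] := by intro e; rw [e] at hl; simp at hl
    have hxne : bcs.map (fun bc => pv_pt bc 0) ≠ [] := by simpa using hne
    have hyne : bcs.map (fun bc => pv_pt bc 1) ≠ [] := by simpa using hne
    simp only [compute_dimensions, compute_dimensions_alt, hl, ne_eq,
      not_true_eq_false, if_false,
      pv_sorted_head_eq_min _ hxne, pv_sorted_last_eq_max _ hxne,
      pv_sorted_head_eq_min _ hyne, pv_sorted_last_eq_max _ hyne]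
  · simp [compute_dimensions, compute_dimensions_alt, hl]
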